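-- pv_equiv track=rewrite | github.com/daniel-reich/ubiquitous-fiesta | cBPj6yfALGfmeZQLG_14.py | vertical_txt
-- ===== SOURCE A (Python) =====
-- def vertical_txt(txt):
--   l = txt.split( " " )
--   m = max( [ len( s ) for s in l ] )
--   l = [ x + ( m - len( x ) ) * " " for x in l ]
--   r = [ [ ] for i in range(m) ]
--   for i in range( m ) :
--     for x in l :
--       r[ i ].append( x[ i ] )
--   return r
-- ===== SOURCE B (Python) =====
-- def vertical_txt(txt):
--     # Peel columns off the words one at a time via iterators; no max/padding pass needed.
--     its = [iter(w) for w in txt.split(" ")]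
--     out = []
--     while True:
--         row, alive = [], False
--         for it in its:
--             c = next(it, None)
--             if c is None:
--                 row.append(" ")
--             else:
--                 row.append(c)
--                 alive = True
--         if not alive:
--             return out
--         out.append(row)
-- ===== Notes on version B (the rewrite author's own statement) =====
-- stated objective: simpler
-- what changed: B peels one column at a time off the word list (head of each word, then tails) until all words are exhausted, eliminating A's max-length computation, the padding pass and the nested index loops.
import Mathlib
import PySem

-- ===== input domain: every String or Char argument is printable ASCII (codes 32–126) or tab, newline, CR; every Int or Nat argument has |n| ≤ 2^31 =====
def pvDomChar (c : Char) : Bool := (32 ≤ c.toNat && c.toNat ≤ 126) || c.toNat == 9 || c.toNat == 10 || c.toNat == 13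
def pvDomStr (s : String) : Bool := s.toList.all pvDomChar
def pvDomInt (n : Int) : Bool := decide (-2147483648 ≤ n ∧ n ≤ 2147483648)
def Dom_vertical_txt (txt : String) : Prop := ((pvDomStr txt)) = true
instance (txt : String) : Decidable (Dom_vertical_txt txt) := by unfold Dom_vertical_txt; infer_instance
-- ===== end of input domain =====

-- B peels columns off the word list (head/tail) instead of A's max-length + padding + nested index loops; objective: simpler.

-- ===== PORT A =====
def vertical_txt (txt : String) : List (List String) :=
  let l := PySem.Chars.splitOn txt.toList [' ']
  let m := (PySem.List.max? (l.map (fun s => (s.length : Int))) (fun y => y)).getD 0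
  let lp := l.map (fun x => x ++ List.replicate (m - (x.length : Int)).toNat ' ')
  (PySem.List.pyRange 0 m 1).map (fun i =>
    lp.foldl (fun acc x => acc ++ [String.ofList [PySem.List.pyGetD x i ' ']]) [])

-- ===== PORT B =====
-- termination helper for the peel loop: the maximal word length
def pvMaxLen (ws : List (List Char)) : Nat :=
  ws.foldr (fun w b => max w.length b) 0

-- zip_longest-style peel; the fuel (= maximal word length) only makes the recursion structural
def pvPeelFuel : Nat → List (List Char) → List (List String)
  | 0, _ => []
  | n + 1, ws =>
    if ws.all (·.isEmpty) then []
    else (ws.map (fun w => String.ofList [w.headD ' '])) :: pvPeelFuel n (ws.map List.tail)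

def pvPeel (ws : List (List Char)) : List (List String) :=
  pvPeelFuel (pvMaxLen ws) ws

def vertical_txt_alt (txt : String) : List (List String) :=
  pvPeel (PySem.Chars.splitOn txt.toList [' '])

-- ===== PRECONDITION & SPEC =====
def Spec_vertical_txt (txt : String) (out : List (List String)) : Prop := out = vertical_txt_alt txt
instance (txt : String) (out : List (List String)) : Decidable (Spec_vertical_txt txt out) := by unfold Spec_vertical_txt; infer_instance

-- ===== CLAIM (what is proved, stated in full; the proofs are below) =====
def Claim_equal_vertical_txt : Prop := ∀ (txt : String), Dom_vertical_txt txt → Spec_vertical_txt txt (vertical_txt txt)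

-- ===== LEMMAS AND PROOFS =====

theorem pvMaxLen_eq_zero (ws : List (List Char)) :
    pvMaxLen ws = 0 ↔ ws.all (·.isEmpty) = true := by
  induction ws with
  | nil => simp [pvMaxLen]
  | cons w t ih =>
    simp only [pvMaxLen, List.foldr_cons, List.all_cons, Bool.and_eq_true,
      List.isEmpty_iff] at *
    constructor
    · intro h
      refine ⟨List.length_eq_zero_iff.mp (by omega), ih.mp (by omega)⟩
    · rintro ⟨h1, h2⟩
      have := ih.mpr h2
      simp [h1, this]

theorem pvMaxLen_map_tail (ws : List (List Char)) :
    pvMaxLen (ws.map List.tail) = pvMaxLen ws - 1 := by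
  induction ws with
  | nil => simp [pvMaxLen]
  | cons w t ih =>
    simp only [pvMaxLen, List.map_cons, List.foldr_cons] at *
    rw [ih]
    have : w.tail.length = w.length - 1 := List.length_tail
    omega


theorem pvPeelFuel_canon : ∀ (n : Nat) (ws : List (List Char)), pvMaxLen ws = n →
    pvPeelFuel n ws = (List.range n).map
      (fun i => ws.map (fun w => String.ofList [w.getD i ' '])) := by
  intro n
  induction n with
  | zero => intro ws h; simp [pvPeelFuel]
  | succ n ih =>
    intro ws h
    have hne : ¬ ws.all (·.isEmpty) = true := by
      intro hall
      rw [(pvMaxLen_eq_zero ws).mpr hall] at h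
      omega
    rw [pvPeelFuel, if_neg hne]
    have htl : pvMaxLen (ws.map List.tail) = n := by
      rw [pvMaxLen_map_tail, h]; omega
    rw [ih _ htl, List.range_succ_eq_map]
    simp only [List.map_cons, List.map_map]
    congr 1
    · apply List.map_congr_left
      intro w _
      cases w <;> rfl
    · apply List.map_congr_left
      intro i _
      simp only [Function.comp]
      apply List.map_congr_left
      intro w _
      cases w <;> rfl

theorem pvPeel_canon (ws : List (List Char)) :
    pvPeel ws = (List.range (pvMaxLen ws)).map
      (fun i => ws.map (fun w => String.ofList [w.getD i ' '])) :=
  pvPeelFuel_canon (pvMaxLen ws) ws rfl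

theorem pvGetD_pad (w : List Char) (k i : Nat) :
    (w ++ List.replicate k ' ').getD i ' ' = w.getD i ' ' := by
  simp only [List.getD_eq_getElem?_getD, List.getElem?_append]
  by_cases hi : i < w.length
  · simp [hi]
  · have hw : w[i]? = none := List.getElem?_eq_none (by omega)
    rcases Nat.lt_or_ge (i - w.length) k with h | h
    · simp [hi, h]
    · have hr : (List.replicate k ' ')[i - w.length]? = (none : Option Char) :=
        List.getElem?_eq_none (by simpa using h)
      simp [hi, hr]
theorem pvMax?_eq (ws : List (List Char)) :
    (PySem.List.max? (ws.map (fun s => (s.length : Int))) (fun y => y)).getD 0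
      = (pvMaxLen ws : Int) := by
  cases ws with
  | nil => simp [pvMaxLen, PySem.List.max?]
  | cons w t =>
    rw [List.map_cons, PySem.List.max?_id_cons]
    have aux : ∀ (us : List (List Char)) (a : Nat),
        (us.map (fun s => (s.length : Int))).foldl max (a : Int)
          = ((us.foldr (fun w b => max w.length b) a : Nat) : Int) := by
      intro us
      induction us with
      | nil => intro a; simp
      | cons u r ihr =>
        intro a
        simp only [List.map_cons, List.foldl_cons, List.foldr_cons]
        rw [← Nat.cast_max, ihr]
        congr 1
        -- max a u.length folded from the left equals max u.length (foldr r a)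
        have comm : ∀ (r : List (List Char)) (x y : Nat),
            r.foldr (fun w b => max w.length b) (max x y)
              = max x (r.foldr (fun w b => max w.length b) y) := by
          intro r
          induction r with
          | nil => intro x y; simp
          | cons v s ihs =>
            intro x y
            simp only [List.foldr_cons, ihs]
            omega
        rw [Nat.max_comm a u.length, comm]
    rw [aux t w.length]
    simp only [Option.getD_some, pvMaxLen, List.foldr_cons]
    congr 1
    -- foldr … w.length = max w.length (foldr … 0)
    have comm : ∀ (r : List (List Char)) (x : Nat),
        r.foldr (fun w b => max w.length b) x
          = max x (r.foldr (fun w b => max w.length b) 0) := by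
      intro r
      induction r with
      | nil => intro x; simp
      | cons v s ihs =>
        intro x
        simp only [List.foldr_cons]
        rw [ihs, ihs 0]
        omega
    rw [comm t w.length, comm t 0]

theorem pvACore (ws : List (List Char)) :
    (PySem.List.pyRange 0 ((PySem.List.max? (ws.map (fun s => (s.length : Int))) (fun y => y)).getD 0) 1).map
      (fun i => (ws.map (fun x => x ++ List.replicate
          (((PySem.List.max? (ws.map (fun s => (s.length : Int))) (fun y => y)).getD 0 - (x.length : Int)).toNat) ' ')).foldl
        (fun acc x => acc ++ [String.ofList [PySem.List.pyGetD x i ' ']]) [])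
      = pvPeel ws := by
  rw [pvMax?_eq ws]
  rw [pvPeel_canon ws]
  rw [PySem.List.pyRange_zero_natCast, List.map_map]
  apply List.map_congr_left
  intro i _
  simp only [Function.comp, PySem.List.foldl_append_singleton_eq_map, List.map_map]
  apply List.map_congr_left
  intro w _
  simp only [Function.comp, PySem.List.pyGetD_natCast]
  rw [pvGetD_pad]

-- ===== VERDICT (by name: the statement is the Claim_ definition above) =====
theorem vertical_txt_spec : Claim_equal_vertical_txt := by
  intro txt _
  unfold Spec_vertical_txt vertical_txt vertical_txt_alt
  exact pvACore (PySem.Chars.splitOn txt.toList [' '])
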